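-- pv_equiv track=rewrite | github.com/DigiScore/neoscore | old/tools/pitch_tools.py | extend_pitches_through_range
-- ===== SOURCE A (Python) =====
-- def find_pitch_class(pitch):
--     """
--     Finds the 0-11 pitch class of any pitch
--     :param pitch: int
--     :return:int pitch class of 0-11
--     """
--     if not isinstance(pitch, int):
--         pitch = int(pitch)
--     if pitch <= 0:
--         direction = 1
--     else:
--         direction = -1
--     while not (0 <= pitch <= 11):
--         pitch += direction * 12
--     return pitch
--
-- def extend_pitches_through_range(pitch_class_list, lowest, highest):
--     """
--     Takes a list of pitch classes (int's between 0 and 11) and transposes and extends it through the window given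
--     :param pitch_class_list: list of int's
--     :param min: int
--     :param max: int
--     :return: extended list
--     """
--     assert isinstance(pitch_class_list, list)
--     full_range = range(lowest, highest)
--     return_list = []
--     for pitch in full_range:
--         if find_pitch_class(pitch) in pitch_class_list:
--             return_list.append(pitch)
--     return return_list
-- ===== SOURCE B (Python) =====
-- def extend_pitches_through_range(pitch_class_list, lowest, highest):
--     assert isinstance(pitch_class_list, list)
--     result = []
--     for c in range(12):
--         start = lowest + ((c - lowest) % 12)
--         if start < highest and c in pitch_class_list:
--             result.extend(range(start, highest, 12))
--     return sorted(result)
-- ===== Notes on version B (the rewrite author's own statement) =====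
-- stated objective: alternative
-- what changed: B iterates over the 12 pitch classes, emits each matched class's arithmetic progression start..highest step 12 directly, and sorts the concatenation, instead of A's scan of every pitch in range(lowest, highest) with a while-loop pitch-class normalisation per element.
import Mathlib
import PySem

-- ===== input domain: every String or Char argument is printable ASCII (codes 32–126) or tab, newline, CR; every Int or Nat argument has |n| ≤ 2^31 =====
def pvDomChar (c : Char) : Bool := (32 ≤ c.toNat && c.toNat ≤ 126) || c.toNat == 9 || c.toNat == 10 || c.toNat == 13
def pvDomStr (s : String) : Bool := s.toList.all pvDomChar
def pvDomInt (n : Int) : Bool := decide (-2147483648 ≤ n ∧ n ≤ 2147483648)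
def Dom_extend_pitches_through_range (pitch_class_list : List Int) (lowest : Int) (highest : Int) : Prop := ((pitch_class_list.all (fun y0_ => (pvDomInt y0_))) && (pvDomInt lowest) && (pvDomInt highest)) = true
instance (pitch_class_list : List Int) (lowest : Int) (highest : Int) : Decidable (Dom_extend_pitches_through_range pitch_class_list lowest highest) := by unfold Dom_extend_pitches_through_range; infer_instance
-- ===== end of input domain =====

-- B emits one arithmetic progression per matched pitch class and sorts the concatenation, instead of A's per-pitch scan with a while-loop normalisation per element (a different algorithm of similar measured cost on the generated inputs).


-- ===== PORT A =====
def fpcLoop : Nat → Int → Int → Int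
  | 0, pitch, _ => pitch
  | n+1, pitch, direction =>
    if 0 ≤ pitch ∧ pitch ≤ 11 then pitch
    else fpcLoop n (pitch + direction * 12) direction

def find_pitch_class (pitch : Int) : Int :=
  let direction : Int := if pitch ≤ 0 then 1 else -1
  -- fuel pitch.natAbs + 1 is enough for the while loop to reach 0..11 (guard for totality only)
  fpcLoop (pitch.natAbs + 1) pitch direction

def extend_pitches_through_range (pitch_class_list : List Int) (lowest : Int) (highest : Int) : List Int :=
  let full_range := PySem.List.pyRange lowest highest 1
  full_range.foldl (fun return_list pitch =>
    if find_pitch_class pitch ∈ pitch_class_list then return_list ++ [pitch] else return_list) []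

-- ===== PORT B =====
def extend_pitches_through_range_alt (pitch_class_list : List Int) (lowest : Int) (highest : Int) : List Int :=
  let result := (PySem.List.pyRange 0 12 1).foldl (fun result c =>
    let start := lowest + PySem.Int.mod (c - lowest) 12
    if start < highest ∧ c ∈ pitch_class_list then
      result ++ PySem.List.pyRange start highest 12
    else result) []
  PySem.List.sorted result (fun x => x)

-- ===== PRECONDITION & SPEC =====
def Spec_extend_pitches_through_range (pitch_class_list : List Int) (lowest : Int) (highest : Int) (out : List Int) : Prop := out = extend_pitches_through_range_alt pitch_class_list lowest highest
instance (pitch_class_list : List Int) (lowest : Int) (highest : Int) (out : List Int) : Decidable (Spec_extend_pitches_through_range pitch_class_list lowest highest out) := by unfold Spec_extend_pitches_through_range; infer_instance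

-- ===== CLAIM (what is proved, stated in full; the proofs are below) =====
def Claim_equal_extend_pitches_through_range : Prop := ∀ (pitch_class_list : List Int) (lowest : Int) (highest : Int), Dom_extend_pitches_through_range pitch_class_list lowest highest → Spec_extend_pitches_through_range pitch_class_list lowest highest (extend_pitches_through_range pitch_class_list lowest highest)

-- ===== LEMMAS AND PROOFS =====

theorem fpcLoop_up : ∀ (n : Nat) (p : Int), -12 * (n : Int) ≤ p → p ≤ 11 → fpcLoop n p 1 = p % 12 := by
  intro n
  induction n with
  | zero => intro p h1 h2; simp [fpcLoop]; omega
  | succ k ih =>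
    intro p h1 h2
    rw [fpcLoop]
    split
    · omega
    · rename_i h
      rw [ih (p + 1 * 12) (by omega) (by omega)]; omega

theorem fpcLoop_down : ∀ (n : Nat) (p : Int), 0 ≤ p → p ≤ 12 * (n : Int) + 11 → fpcLoop n p (-1) = p % 12 := by
  intro n
  induction n with
  | zero => intro p h1 h2; simp [fpcLoop]; omega
  | succ k ih =>
    intro p h1 h2
    rw [fpcLoop]
    split
    · omega
    · rename_i h
      rw [ih (p + -1 * 12) (by omega) (by omega)]; omega

theorem fpc_eq (p : Int) : find_pitch_class p = p % 12 := by
  unfold find_pitch_class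
  by_cases h : p ≤ 0
  · simp only [h, if_true]
    exact fpcLoop_up (p.natAbs + 1) p (by omega) (by omega)
  · simp only [h, if_false]
    exact fpcLoop_down (p.natAbs + 1) p (by omega) (by omega)

theorem mem_chunk (lo hi c x : Int) (hc : 0 ≤ c) (hc' : c < 12) :
    x ∈ PySem.List.pyRange (lo + PySem.Int.mod (c - lo) 12) hi 12 ↔ lo ≤ x ∧ x < hi ∧ x % 12 = c := by
  rw [PySem.Int.mod_eq_emod_of_pos (by norm_num)]
  rw [PySem.List.mem_pyRange_iff_of_pos (by norm_num)]
  omega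

theorem nodup_chunk (lo hi c : Int) : (PySem.List.pyRange (lo + PySem.Int.mod (c - lo) 12) hi 12).Nodup := by
  rw [PySem.List.pyRange_of_pos _ _ (by norm_num : (0:Int) < 12)]
  exact (List.nodup_range).map (fun x y h => by omega)

theorem main_eq (L : List Int) (lo hi : Int) :
    extend_pitches_through_range L lo hi = extend_pitches_through_range_alt L lo hi := by
  unfold extend_pitches_through_range extend_pitches_through_range_alt
  simp only []
  -- A side: foldl append-if is filter
  rw [PySem.List.foldl_append_ite_eq_filter]
  rw [List.nil_append]
  -- B side: turn the conditional extend into a flatMap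
  have hfun : (fun (result : List Int) (c : Int) =>
      let start := lo + PySem.Int.mod (c - lo) 12
      if start < hi ∧ c ∈ L then result ++ PySem.List.pyRange start hi 12 else result)
      = (fun result c => result ++ if lo + PySem.Int.mod (c - lo) 12 < hi ∧ c ∈ L then
          PySem.List.pyRange (lo + PySem.Int.mod (c - lo) 12) hi 12 else []) := by
    funext r c; simp only []; split <;> simp
  rw [hfun, PySem.List.foldl_append_eq_flatMap, List.nil_append]
  set g' : Int → List Int := fun c => if lo + PySem.Int.mod (c - lo) 12 < hi ∧ c ∈ L then
      PySem.List.pyRange (lo + PySem.Int.mod (c - lo) 12) hi 12 else [] with hg'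
  have hgmem : ∀ c x : Int, 0 ≤ c → c < 12 →
      (x ∈ g' c ↔ (lo ≤ x ∧ x < hi) ∧ x % 12 = c ∧ c ∈ L) := by
    intro c x h0 h12
    replace hg' : g' c = if lo + PySem.Int.mod (c - lo) 12 < hi ∧ c ∈ L then
        PySem.List.pyRange (lo + PySem.Int.mod (c - lo) 12) hi 12 else [] := by rw [hg']
    by_cases hcl : lo + PySem.Int.mod (c - lo) 12 < hi ∧ c ∈ L
    · rw [hg', if_pos hcl, mem_chunk lo hi c x h0 h12]
      tauto
    · rw [hg', if_neg hcl]
      simp only [List.not_mem_nil, false_iff]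
      rintro ⟨⟨hxl, hxh⟩, hxc, hcL⟩
      apply hcl
      refine ⟨?_, hcL⟩
      rw [PySem.Int.mod_eq_emod_of_pos (by norm_num)]
      omega
  set A := (PySem.List.pyRange lo hi 1).filter (fun p => decide (find_pitch_class p ∈ L)) with hA
  have memA : ∀ x, x ∈ A ↔ (lo ≤ x ∧ x < hi) ∧ x % 12 ∈ L := by
    intro x
    rw [hA, List.mem_filter, PySem.List.mem_pyRange_one, fpc_eq]
    simp only [decide_eq_true_eq]
  have memR : ∀ x, x ∈ (PySem.List.pyRange 0 12 1).flatMap g' ↔ (lo ≤ x ∧ x < hi) ∧ x % 12 ∈ L := by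
    intro x
    rw [List.mem_flatMap]
    constructor
    · rintro ⟨c, hc, hx⟩
      rw [PySem.List.mem_pyRange_one] at hc
      rw [hgmem c x hc.1 hc.2] at hx
      exact ⟨hx.1, hx.2.1 ▸ hx.2.2⟩
    · rintro ⟨⟨h1, h2⟩, h3⟩
      refine ⟨x % 12, ?_, ?_⟩
      · rw [PySem.List.mem_pyRange_one]; omega
      · rw [hgmem (x % 12) x (by omega) (by omega)]
        exact ⟨⟨h1, h2⟩, rfl, h3⟩
  have nodA : A.Nodup := (PySem.List.nodup_pyRange_one lo hi).filter _
  have pwA : A.Pairwise (· < ·) := (PySem.List.pairwise_lt_pyRange_one lo hi).filter _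
  have nodR : ((PySem.List.pyRange 0 12 1).flatMap g').Nodup := by
    rw [List.nodup_flatMap]
    constructor
    · intro c _
      replace hg' : g' c = if lo + PySem.Int.mod (c - lo) 12 < hi ∧ c ∈ L then
          PySem.List.pyRange (lo + PySem.Int.mod (c - lo) 12) hi 12 else [] := by rw [hg']
      rw [hg']
      split
      · exact nodup_chunk lo hi c
      · exact List.nodup_nil
    · refine (PySem.List.pairwise_lt_pyRange_one 0 12).imp_of_mem ?_
      intro c d hc hd hlt
      rw [PySem.List.mem_pyRange_one] at hc hd
      intro x hx hx'
      rw [hgmem c x hc.1 hc.2] at hx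
      rw [hgmem d x hd.1 hd.2] at hx'
      omega
  have perm : A.Perm ((PySem.List.pyRange 0 12 1).flatMap g') := by
    rw [List.perm_ext_iff_of_nodup nodA nodR]
    intro a; rw [memA, memR]
  exact (PySem.List.sorted_eq_of_perm_of_pairwise_lt _ _ _ perm pwA).symm

-- ===== VERDICT (by name: the statement is the Claim_ definition above) =====
theorem extend_pitches_through_range_spec : Claim_equal_extend_pitches_through_range := by
  intro L lo hi _
  unfold Spec_extend_pitches_through_range
  exact main_eq L lo hi
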